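-- pv_equiv track=rewrite | github.com/Alpamisdev/qrmicrosaas | app/endpoints_dynamic_qr.py | _detect_device_os_browser
-- ===== SOURCE A (Python) =====
-- from typing import Optional
--
-- def _detect_device_os_browser(user_agent: str) -> tuple[str, Optional[str], Optional[str]]:
--     ua = user_agent.lower()
--     # Device
--     device = "mobile" if any(x in ua for x in ["mobile", "iphone", "android", "ipod"]) else ("tablet" if any(x in ua for x in ["ipad", "tablet"]) else "desktop")
--     # OS
--     if "android" in ua:
--         os = "android"
--     elif any(x in ua for x in ["iphone", "ipad", "ipod", "ios"]):
--         os = "ios"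
--     elif "windows" in ua:
--         os = "windows"
--     elif "mac os x" in ua or "macintosh" in ua:
--         os = "macos"
--     elif "cros" in ua:
--         os = "chromeos"
--     elif "linux" in ua:
--         os = "linux"
--     else:
--         os = None
--     # Browser (order matters)
--     if "yabrowser" in ua or "yandex" in ua:
--         browser = "yandex"
--     elif "opr/" in ua or "opera" in ua:
--         browser = "opera"
--     elif "edg/" in ua or "edge" in ua:
--         browser = "edge"
--     elif "samsungbrowser" in ua:
--         browser = "samsung"
--     elif "firefox" in ua or "fxios" in ua:
--         browser = "firefox"
--     elif "crios" in ua: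
--         browser = "chrome"
--     elif "chrome" in ua and "chromium" not in ua and "edg" not in ua and "opr" not in ua and "yabrowser" not in ua:
--         browser = "chrome"
--     elif "safari" in ua:
--         browser = "safari"
--     elif "brave" in ua:
--         browser = "brave"
--     else:
--         browser = None
--     return device, os, browser
-- ===== SOURCE B (Python) =====
-- from typing import Optional
--
-- # All substrings the classifier ever tests for.
-- _KEYWORDS = ("mobile", "iphone", "android", "ipod", "ipad", "tablet", "ios",
--              "windows", "mac os x", "macintosh", "cros", "linux",
--              "yabrowser", "yandex", "opr/", "opera", "edg/", "edge",
--              "samsungbrowser", "firefox", "fxios", "crios", "chrome",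
--              "chromium", "edg", "opr", "safari", "brave")
--
-- # Decision tables over the found-keyword set: first row whose any-of set intersects
-- # `found` and whose none-of set does not wins.
-- _DEVICE = [({"mobile", "iphone", "android", "ipod"}, set(), "mobile"),
--            ({"ipad", "tablet"}, set(), "tablet")]
-- _OS = [({"android"}, set(), "android"),
--        ({"iphone", "ipad", "ipod", "ios"}, set(), "ios"),
--        ({"windows"}, set(), "windows"),
--        ({"mac os x", "macintosh"}, set(), "macos"),
--        ({"cros"}, set(), "chromeos"),
--        ({"linux"}, set(), "linux")]
-- _BROWSER = [({"yabrowser", "yandex"}, set(), "yandex"),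
--             ({"opr/", "opera"}, set(), "opera"),
--             ({"edg/", "edge"}, set(), "edge"),
--             ({"samsungbrowser"}, set(), "samsung"),
--             ({"firefox", "fxios"}, set(), "firefox"),
--             ({"crios"}, set(), "chrome"),
--             ({"chrome"}, {"chromium", "edg", "opr", "yabrowser"}, "chrome"),
--             ({"safari"}, set(), "safari"),
--             ({"brave"}, set(), "brave")]
--
--
-- def _decide(found, table):
--     for any_of, none_of, label in table:
--         if (found & any_of) and not (found & none_of):
--             return label
--     return None
--
--
-- def _detect_device_os_browser(user_agent: str) -> tuple[str, Optional[str], Optional[str]]: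
--     ua = user_agent.lower()
--     # One sweep over the string: at each position mark every keyword starting there.
--     found = set()
--     for i in range(len(ua)):
--         for kw in _KEYWORDS:
--             if kw not in found and ua.startswith(kw, i):
--                 found.add(kw)
--     device = _decide(found, _DEVICE) or "desktop"
--     return device, _decide(found, _OS), _decide(found, _BROWSER)
-- ===== Notes on version B (the rewrite author's own statement) =====
-- stated objective: alternative
-- what changed: Instead of running a separate substring search per keyword inside three if/elif cascades, B makes one sweep over the string marking every keyword that starts at each position, then reads the three answers off that found-set with priority tables.
import Mathlib
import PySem

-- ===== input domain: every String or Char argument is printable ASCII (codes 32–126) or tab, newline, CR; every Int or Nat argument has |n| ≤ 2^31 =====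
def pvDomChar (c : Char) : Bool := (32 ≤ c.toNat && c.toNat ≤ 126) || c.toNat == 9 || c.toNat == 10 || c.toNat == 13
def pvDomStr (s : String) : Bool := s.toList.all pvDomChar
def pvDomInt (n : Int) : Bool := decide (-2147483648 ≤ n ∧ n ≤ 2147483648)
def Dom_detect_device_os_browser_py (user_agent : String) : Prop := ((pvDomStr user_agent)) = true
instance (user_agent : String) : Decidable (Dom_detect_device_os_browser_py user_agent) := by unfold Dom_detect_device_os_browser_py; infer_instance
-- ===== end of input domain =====

-- B replaces A's per-keyword substring searches and if/elif cascades by one sweep over the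
-- string that marks every keyword found, plus decision tables over that set (objective: alternative).

-- ===== PORT A =====
def detect_device_os_browser_py (user_agent : String) : String × Option String × Option String :=
  let ua := PySem.Str.lower user_agent
  let device :=
    if ["mobile", "iphone", "android", "ipod"].any (fun x => PySem.Str.isIn x ua) then "mobile"
    else if ["ipad", "tablet"].any (fun x => PySem.Str.isIn x ua) then "tablet"
    else "desktop"
  let os : Option String :=
    if PySem.Str.isIn "android" ua then some "android"
    else if ["iphone", "ipad", "ipod", "ios"].any (fun x => PySem.Str.isIn x ua) then some "ios"
    else if PySem.Str.isIn "windows" ua then some "windows"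
    else if PySem.Str.isIn "mac os x" ua || PySem.Str.isIn "macintosh" ua then some "macos"
    else if PySem.Str.isIn "cros" ua then some "chromeos"
    else if PySem.Str.isIn "linux" ua then some "linux"
    else none
  let browser : Option String :=
    if PySem.Str.isIn "yabrowser" ua || PySem.Str.isIn "yandex" ua then some "yandex"
    else if PySem.Str.isIn "opr/" ua || PySem.Str.isIn "opera" ua then some "opera"
    else if PySem.Str.isIn "edg/" ua || PySem.Str.isIn "edge" ua then some "edge"
    else if PySem.Str.isIn "samsungbrowser" ua then some "samsung"
    else if PySem.Str.isIn "firefox" ua || PySem.Str.isIn "fxios" ua then some "firefox"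
    else if PySem.Str.isIn "crios" ua then some "chrome"
    else if PySem.Str.isIn "chrome" ua && !PySem.Str.isIn "chromium" ua
            && !PySem.Str.isIn "edg" ua && !PySem.Str.isIn "opr" ua
            && !PySem.Str.isIn "yabrowser" ua then some "chrome"
    else if PySem.Str.isIn "safari" ua then some "safari"
    else if PySem.Str.isIn "brave" ua then some "brave"
    else none
  (device, os, browser)

-- ===== PORT B =====
-- all substrings the classifier ever tests for
def pvKeywords : List String :=
  ["mobile", "iphone", "android", "ipod", "ipad", "tablet", "ios",
   "windows", "mac os x", "macintosh", "cros", "linux",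
   "yabrowser", "yandex", "opr/", "opera", "edg/", "edge",
   "samsungbrowser", "firefox", "fxios", "crios", "chrome",
   "chromium", "edg", "opr", "safari", "brave"]

-- decision tables: (any-of set, none-of set, label)
def pvDeviceTable : List (List String × List String × String) :=
  [(["mobile", "iphone", "android", "ipod"], [], "mobile"),
   (["ipad", "tablet"], [], "tablet")]

def pvOsTable : List (List String × List String × String) :=
  [(["android"], [], "android"),
   (["iphone", "ipad", "ipod", "ios"], [], "ios"),
   (["windows"], [], "windows"),
   (["mac os x", "macintosh"], [], "macos"),
   (["cros"], [], "chromeos"),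
   (["linux"], [], "linux")]

def pvBrowserTable : List (List String × List String × String) :=
  [(["yabrowser", "yandex"], [], "yandex"),
   (["opr/", "opera"], [], "opera"),
   (["edg/", "edge"], [], "edge"),
   (["samsungbrowser"], [], "samsung"),
   (["firefox", "fxios"], [], "firefox"),
   (["crios"], [], "chrome"),
   (["chrome"], ["chromium", "edg", "opr", "yabrowser"], "chrome"),
   (["safari"], [], "safari"),
   (["brave"], [], "brave")]

-- first row whose any-of set meets `found` and whose none-of set does not (Python
-- truthiness of a set = nonemptiness of the intersection)
def pvDecide (found : PySem.Set String) : List (List String × List String × String) → Option String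
  | [] => none
  | (anyOf, noneOf, label) :: rest =>
    if !(PySem.Set.inter found anyOf).isEmpty && (PySem.Set.inter found noneOf).isEmpty then
      some label
    else pvDecide found rest

-- the sweep: one pass over the positions, marking every keyword that starts there
def pvScan (chars : List Char) : PySem.Set String :=
  (List.range chars.length).foldl
    (fun acc i => pvKeywords.foldl
      (fun acc kw =>
        if !(PySem.Set.contains acc kw) && kw.toList.isPrefixOf (chars.drop i) then
          PySem.Set.add acc kw
        else acc)
      acc)
    PySem.Set.empty

def detect_device_os_browser_py_alt (user_agent : String) : String × Option String × Option String :=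
  let ua := PySem.Str.lower user_agent
  -- ua.startswith(kw, i) on strings = kw.toList <+: ua.toList.drop i (hand port:
  -- PySem.Str.startswith takes no start index; exact, character-for-character)
  let found := pvScan ua.toList
  ((pvDecide found pvDeviceTable).getD "desktop",
   pvDecide found pvOsTable,
   pvDecide found pvBrowserTable)

-- ===== PRECONDITION & SPEC =====
def Spec_detect_device_os_browser_py (user_agent : String) (out : String × Option String × Option String) : Prop := out = detect_device_os_browser_py_alt user_agent
instance (user_agent : String) (out : String × Option String × Option String) : Decidable (Spec_detect_device_os_browser_py user_agent out) := by unfold Spec_detect_device_os_browser_py; infer_instance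

-- ===== CLAIM (what is proved, stated in full; the proofs are below) =====
def Claim_equal_detect_device_os_browser_py : Prop := ∀ (user_agent : String), Dom_detect_device_os_browser_py user_agent → Spec_detect_device_os_browser_py user_agent (detect_device_os_browser_py user_agent)

-- ===== LEMMAS AND PROOFS =====

-- one step of the sweep: the set gains k exactly when k starts at position i
theorem pvStep (chars : List Char) (i : Nat) (k x : String) (acc : PySem.Set String) :
    (x ∈ (if !(PySem.Set.contains acc k) && k.toList.isPrefixOf (chars.drop i) then
            PySem.Set.add acc k
          else acc))
      ↔ x ∈ acc ∨ (x = k ∧ x.toList.isPrefixOf (chars.drop i) = true) := by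
  by_cases hc : PySem.Set.contains acc k = true
  · have hk : k ∈ acc := by simpa [PySem.Set.contains, List.contains_eq_mem] using hc
    rw [if_neg (by simp [PySem.Set.contains, hk])]
    constructor
    · exact Or.inl
    · rintro (h | ⟨rfl, _⟩)
      · exact h
      · exact hk
  · have hk : k ∉ acc := by simpa [PySem.Set.contains, List.contains_eq_mem] using hc
    by_cases hp : k.toList.isPrefixOf (chars.drop i) = true
    · rw [if_pos (by simp [PySem.Set.contains, hk, hp]),
        show PySem.Set.add acc k = acc ++ [k] from by
          simp [PySem.Set.add, PySem.Set.contains, hk]]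
      simp only [List.mem_append, List.mem_singleton]
      constructor
      · rintro (h | rfl)
        · exact Or.inl h
        · exact Or.inr ⟨rfl, hp⟩
      · rintro (h | ⟨rfl, _⟩)
        · exact Or.inl h
        · exact Or.inr rfl
    · rw [if_neg (by simp [hp])]
      constructor
      · exact Or.inl
      · rintro (h | ⟨rfl, h2⟩)
        · exact h
        · exact absurd h2 hp

-- membership after the inner (per-position) fold over the keyword list
theorem pvMem_inner (chars : List Char) (i : Nat) (kws : List String) (acc : PySem.Set String)
    (x : String) :
    (x ∈ kws.foldl
        (fun acc kw =>
          if !(PySem.Set.contains acc kw) && kw.toList.isPrefixOf (chars.drop i) then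
            PySem.Set.add acc kw
          else acc) acc)
      ↔ x ∈ acc ∨ (x ∈ kws ∧ x.toList.isPrefixOf (chars.drop i) = true) := by
  induction kws generalizing acc with
  | nil => simp
  | cons k ks ih =>
    rw [List.foldl_cons, ih, pvStep]
    simp only [List.mem_cons]
    tauto

-- membership after the outer fold over the positions
theorem pvMem_outer (chars : List Char) (is : List Nat) (acc : PySem.Set String) (x : String) :
    (x ∈ is.foldl
        (fun acc i => pvKeywords.foldl
          (fun acc kw =>
            if !(PySem.Set.contains acc kw) && kw.toList.isPrefixOf (chars.drop i) then
              PySem.Set.add acc kw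
            else acc) acc) acc)
      ↔ x ∈ acc ∨ ∃ i ∈ is, x ∈ pvKeywords ∧ x.toList.isPrefixOf (chars.drop i) = true := by
  induction is generalizing acc with
  | nil => simp
  | cons j js ih =>
    simp only [List.foldl_cons, ih, pvMem_inner]
    constructor
    · rintro (⟨h | h⟩ | ⟨i, hi, h⟩)
      · exact Or.inl h
      · exact Or.inr ⟨j, by simp, h⟩
      · exact Or.inr ⟨i, by simp [hi], h⟩
    · rintro (h | ⟨i, hi, h⟩)
      · exact Or.inl (Or.inl h)
      · rcases List.mem_cons.mp hi with rfl | hi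
        · exact Or.inl (Or.inr h)
        · exact Or.inr ⟨i, hi, h⟩

-- the sweep finds exactly the keywords occurring as substrings
theorem pvFound_eq_isIn (chars : List Char) (kw : String) (hk : kw ∈ pvKeywords)
    (hne : kw.toList ≠ []) :
    PySem.Set.contains (pvScan chars) kw = PySem.Chars.isIn kw.toList chars := by
  have hmem : kw ∈ pvScan chars
      ↔ ∃ i ∈ List.range chars.length, kw ∈ pvKeywords
          ∧ kw.toList.isPrefixOf (chars.drop i) = true := by
    unfold pvScan
    rw [pvMem_outer]
    simp [PySem.Set.empty]
  rw [Bool.eq_iff_iff]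
  constructor
  · intro h
    have h' : kw ∈ pvScan chars := by
      simpa [PySem.Set.contains, List.contains_eq_mem] using h
    rcases hmem.mp h' with ⟨i, _, _, hp⟩
    exact (PySem.Chars.exists_prefix_drop_iff_isIn _ _).mp ⟨i, List.isPrefixOf_iff_prefix.mp hp⟩
  · intro h
    rw [← PySem.Chars.exists_prefix_drop_iff_isIn] at h
    obtain ⟨j, hj⟩ := h
    have hjlt : j < chars.length := by
      by_contra hge
      have hnil : chars.drop j = [] := List.drop_eq_nil_iff.mpr (by omega)
      rw [hnil] at hj
      exact hne (List.prefix_nil.mp hj)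
    have : kw ∈ pvScan chars :=
      hmem.mpr ⟨j, List.mem_range.mpr hjlt, hk, List.isPrefixOf_iff_prefix.mpr hj⟩
    simpa [PySem.Set.contains, List.contains_eq_mem] using this

-- Python truthiness of `found & table_set`: nonempty intersection = some table element found
theorem pvInter_not_isEmpty (s : PySem.Set String) (t : List String) :
    (!(PySem.Set.inter s t).isEmpty) = t.any (fun x => PySem.Set.contains s x) := by
  rw [Bool.eq_iff_iff]
  constructor
  · intro h
    have hne : PySem.Set.inter s t ≠ [] := by
      simpa [List.isEmpty_iff] using h
    rcases List.exists_mem_of_ne_nil _ hne with ⟨x, hx⟩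
    rcases List.mem_filter.mp hx with ⟨hs, ht⟩
    exact List.any_eq_true.mpr ⟨x, by simpa using ht, by simpa [PySem.Set.contains]⟩
  · intro h
    rcases List.any_eq_true.mp h with ⟨x, hxt, hxs⟩
    have hx : x ∈ PySem.Set.inter s t :=
      List.mem_filter.mpr ⟨by simpa [PySem.Set.contains] using hxs, by simpa⟩
    simpa [List.isEmpty_iff] using List.ne_nil_of_mem hx

-- emptiness of the intersection (the none-of test), derived form
theorem pvInter_isEmpty (s : PySem.Set String) (t : List String) :
    (PySem.Set.inter s t).isEmpty = !(t.any (fun x => PySem.Set.contains s x)) := by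
  rw [← pvInter_not_isEmpty, Bool.not_not]

-- the three decision chains, as pure boolean-table facts (discharged by `decide`)
theorem pvDeviceBool (b0 b1 b2 b3 b4 b5 : Bool) :
    (if (b0 || (b1 || (b2 || b3))) = true then "mobile"
     else if (b4 || b5) = true then "tablet" else "desktop")
    = ((if (!!(b0 || (b1 || (b2 || b3))) && !false) = true then some "mobile"
        else if (!!(b4 || b5) && !false) = true then some "tablet"
        else none).getD "desktop") := by
  revert b0 b1 b2 b3 b4 b5; decide

theorem pvOsBool (b1 b2 b3 b4 b6 b7 b8 b9 b10 b11 : Bool) :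
    (if b2 = true then some "android"
     else if (b1 || (b4 || (b3 || b6))) = true then some "ios"
     else if b7 = true then some "windows"
     else if (b8 || b9) = true then some "macos"
     else if b10 = true then some "chromeos"
     else if b11 = true then some "linux" else (none : Option String))
    = (if (!!b2 && !false) = true then some "android"
       else if (!!(b1 || (b4 || (b3 || b6))) && !false) = true then some "ios"
       else if (!!b7 && !false) = true then some "windows"
       else if (!!(b8 || b9) && !false) = true then some "macos"
       else if (!!b10 && !false) = true then some "chromeos"
       else if (!!b11 && !false) = true then some "linux" else none) := by
  revert b1 b2 b3 b4 b6 b7 b8 b9 b10 b11; decide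

theorem pvBrowserBool (b12 b13 b14 b15 b16 b17 b18 b19 b20 b21 b22 b23 b24 b25 b26 b27 : Bool) :
    (if (b12 || b13) = true then some "yandex"
     else if (b14 || b15) = true then some "opera"
     else if (b16 || b17) = true then some "edge"
     else if b18 = true then some "samsung"
     else if (b19 || b20) = true then some "firefox"
     else if b21 = true then some "chrome"
     else if (b22 && !b23 && !b24 && !b25 && !b12) = true then some "chrome"
     else if b26 = true then some "safari"
     else if b27 = true then some "brave" else (none : Option String))
    = (if (!!(b12 || b13) && !false) = true then some "yandex"
       else if (!!(b14 || b15) && !false) = true then some "opera"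
       else if (!!(b16 || b17) && !false) = true then some "edge"
       else if (!!b18 && !false) = true then some "samsung"
       else if (!!(b19 || b20) && !false) = true then some "firefox"
       else if (!!b21 && !false) = true then some "chrome"
       else if (!!b22 && !(b23 || (b24 || (b25 || b12)))) = true then some "chrome"
       else if (!!b26 && !false) = true then some "safari"
       else if (!!b27 && !false) = true then some "brave" else none) := by
  revert b12 b13 b14 b15 b16 b17 b18 b19 b20 b21 b22 b23 b24 b25 b26 b27; decide

-- ===== VERDICT (by name: the statement is the Claim_ definition above) =====
theorem detect_device_os_browser_py_spec : Claim_equal_detect_device_os_browser_py := by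
  intro ua _
  unfold Spec_detect_device_os_browser_py detect_device_os_browser_py detect_device_os_browser_py_alt
  simp only [pvDecide, pvDeviceTable, pvOsTable, pvBrowserTable, pvInter_isEmpty,
    List.any_cons, List.any_nil, Bool.or_false, PySem.Str.isIn_eq]
  rw [pvFound_eq_isIn ((PySem.Str.lower ua).toList) "mobile" (by decide) (by decide),
    pvFound_eq_isIn ((PySem.Str.lower ua).toList) "iphone" (by decide) (by decide),
    pvFound_eq_isIn ((PySem.Str.lower ua).toList) "android" (by decide) (by decide),
    pvFound_eq_isIn ((PySem.Str.lower ua).toList) "ipod" (by decide) (by decide),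
    pvFound_eq_isIn ((PySem.Str.lower ua).toList) "ipad" (by decide) (by decide),
    pvFound_eq_isIn ((PySem.Str.lower ua).toList) "tablet" (by decide) (by decide),
    pvFound_eq_isIn ((PySem.Str.lower ua).toList) "ios" (by decide) (by decide),
    pvFound_eq_isIn ((PySem.Str.lower ua).toList) "windows" (by decide) (by decide),
    pvFound_eq_isIn ((PySem.Str.lower ua).toList) "mac os x" (by decide) (by decide),
    pvFound_eq_isIn ((PySem.Str.lower ua).toList) "macintosh" (by decide) (by decide),
    pvFound_eq_isIn ((PySem.Str.lower ua).toList) "cros" (by decide) (by decide),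
    pvFound_eq_isIn ((PySem.Str.lower ua).toList) "linux" (by decide) (by decide),
    pvFound_eq_isIn ((PySem.Str.lower ua).toList) "yabrowser" (by decide) (by decide),
    pvFound_eq_isIn ((PySem.Str.lower ua).toList) "yandex" (by decide) (by decide),
    pvFound_eq_isIn ((PySem.Str.lower ua).toList) "opr/" (by decide) (by decide),
    pvFound_eq_isIn ((PySem.Str.lower ua).toList) "opera" (by decide) (by decide),
    pvFound_eq_isIn ((PySem.Str.lower ua).toList) "edg/" (by decide) (by decide),
    pvFound_eq_isIn ((PySem.Str.lower ua).toList) "edge" (by decide) (by decide),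
    pvFound_eq_isIn ((PySem.Str.lower ua).toList) "samsungbrowser" (by decide) (by decide),
    pvFound_eq_isIn ((PySem.Str.lower ua).toList) "firefox" (by decide) (by decide),
    pvFound_eq_isIn ((PySem.Str.lower ua).toList) "fxios" (by decide) (by decide),
    pvFound_eq_isIn ((PySem.Str.lower ua).toList) "crios" (by decide) (by decide),
    pvFound_eq_isIn ((PySem.Str.lower ua).toList) "chrome" (by decide) (by decide),
    pvFound_eq_isIn ((PySem.Str.lower ua).toList) "chromium" (by decide) (by decide),
    pvFound_eq_isIn ((PySem.Str.lower ua).toList) "edg" (by decide) (by decide),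
    pvFound_eq_isIn ((PySem.Str.lower ua).toList) "opr" (by decide) (by decide),
    pvFound_eq_isIn ((PySem.Str.lower ua).toList) "safari" (by decide) (by decide),
    pvFound_eq_isIn ((PySem.Str.lower ua).toList) "brave" (by decide) (by decide)]
  refine congrArg₂ Prod.mk ?_ (congrArg₂ Prod.mk ?_ ?_)
  · exact pvDeviceBool _ _ _ _ _ _
  · exact pvOsBool _ _ _ _ _ _ _ _ _ _
  · exact pvBrowserBool _ _ _ _ _ _ _ _ _ _ _ _ _ _ _ _
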